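-- pv_equiv track=rewrite | github.com/pypi-data/pypi-mirror-154 | packages/absfuyu/absfuyu-1.6.0-py3-none-any.whl/absfuyu/strings.py | strHex
-- ===== SOURCE A (Python) =====
-- def strHex(your_string: str, output_opt: str = "x") -> str:
--     r"""
--     Summary
--     -------
--     Convert string to hex form
--
--     Parameters
--     ----------
--     your_string : str
--         string that need to be convert
--
--     output_opt : str
--         "x": hex string in the form of \x (default)
--         "normal": normal hex string
--
--     Returns
--     -------
--     str
--         Hexed string
--     """
--
--     output_option = {
--         "normal":0,
--         "x":1
--     }
--     # normal: normal hex string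
--     # x: hex string in the form of \x
--
--     outopt = output_option[output_opt]
--
--     byte_str = your_string.encode('utf-8')
--     hex_str = byte_str.hex()
--
--     if outopt == 0:
--         return hex_str
--
--     elif outopt == 1:
--         temp = []
--         str_len = len(hex_str)
--
--         for i in range(str_len):
--             if i % 2 == 0:
--                 temp.append(f"\\x")
--             temp.append(hex_str[i])
--         return ''.join(temp)
-- ===== SOURCE B (Python) =====
-- def strHex(your_string: str, output_opt: str = "x") -> str:
--     output_option = {
--         "normal": 0,
--         "x": 1
--     }
--     outopt = output_option[output_opt]
--     byte_str = your_string.encode('utf-8')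
--     if outopt == 0:
--         return byte_str.hex()
--     return ''.join(f"\\x{b:02x}" for b in byte_str)
-- ===== Notes on version B (the rewrite author's own statement) =====
-- stated objective: idiomatic
-- what changed: The escape-format branch emits one formatted token per byte in a single pass over the bytes, instead of building the full hex string first and re-scanning its characters with an i % 2 parity test.
import Mathlib
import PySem

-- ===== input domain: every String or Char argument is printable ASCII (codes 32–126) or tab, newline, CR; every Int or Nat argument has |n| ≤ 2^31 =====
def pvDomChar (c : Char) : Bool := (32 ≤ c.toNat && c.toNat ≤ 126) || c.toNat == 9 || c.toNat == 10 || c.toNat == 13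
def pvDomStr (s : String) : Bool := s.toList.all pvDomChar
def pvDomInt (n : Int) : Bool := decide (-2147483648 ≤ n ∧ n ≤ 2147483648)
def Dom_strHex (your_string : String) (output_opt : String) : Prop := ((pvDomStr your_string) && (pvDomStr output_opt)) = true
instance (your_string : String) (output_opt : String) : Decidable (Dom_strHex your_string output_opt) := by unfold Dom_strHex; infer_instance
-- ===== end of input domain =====

-- B's escape-format branch emits one two-digit escape token per byte in a single pass over the bytes instead of
-- building the full hex string and re-scanning its characters with an i % 2 parity test (objective: idiomatic).

-- ===== PORT A =====
-- lowercase hex digit of n (0 ≤ n < 16), as Python's bytes.hex / %02x format produce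
def hexDigit (n : Nat) : Char := if n < 10 then Char.ofNat (48 + n) else Char.ofNat (87 + n)

-- bytes.hex(): two lowercase hex digits per byte
def hexOf (bs : List Nat) : List Char := bs.flatMap (fun b => [hexDigit (b / 16), hexDigit (b % 16)])

def strHex (your_string : String) (output_opt : String) : String :=
  let output_option : PySem.Dict String Int := PySem.Dict.ofList [("normal", 0), ("x", 1)]
  match PySem.Dict.get? output_option output_opt with
  | none => ""  -- KeyError in Python: excluded by Pre_strHex
  | some outopt =>
    -- encode('utf-8'): exact on Dom (all chars are ASCII, so one byte = the char code)
    let byte_str : List Nat := your_string.toList.map Char.toNat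
    let hex_str : List Char := hexOf byte_str
    if outopt = 0 then
      String.ofList hex_str
    else
      let str_len : Int := hex_str.length
      let temp : List (List Char) :=
        (PySem.List.pyRange 0 str_len 1).foldl
          (fun temp i =>
            let temp := if PySem.Int.mod i 2 = 0 then temp ++ [['\\', 'x']] else temp
            temp ++ [[PySem.List.pyGetD hex_str i ' ']])
          []
      String.ofList (PySem.Chars.join [] temp)

-- ===== PORT B =====
def strHex_alt (your_string : String) (output_opt : String) : String :=
  let output_option : PySem.Dict String Int := PySem.Dict.ofList [("normal", 0), ("x", 1)]
  match PySem.Dict.get? output_option output_opt with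
  | none => ""  -- KeyError in Python: excluded by Pre_strHex
  | some outopt =>
    let byte_str : List Nat := your_string.toList.map Char.toNat  -- encode('utf-8'): exact on Dom (ASCII)
    if outopt = 0 then
      String.ofList (hexOf byte_str)  -- byte_str.hex()
    else
      -- ''.join(f"\x{b:02x}" for b in byte_str)
      String.ofList (byte_str.flatMap (fun b => ['\\', 'x', hexDigit (b / 16), hexDigit (b % 16)]))

-- ===== PRECONDITION & SPEC =====
-- Pre_ excludes exactly the output_opt values outside the option dict, on which A raises KeyError.
def Pre_strHex (your_string : String) (output_opt : String) : Prop :=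
  output_opt = "normal" ∨ output_opt = "x"
instance (your_string : String) (output_opt : String) : Decidable (Pre_strHex your_string output_opt) := by
  unfold Pre_strHex; infer_instance

def pvWitness_strHex : String × String := ("ab", "x")

def Spec_strHex (your_string : String) (output_opt : String) (out : String) : Prop := out = strHex_alt your_string output_opt
instance (your_string : String) (output_opt : String) (out : String) : Decidable (Spec_strHex your_string output_opt out) := by unfold Spec_strHex; infer_instance

-- ===== CLAIM (what is proved, stated in full; the proofs are below) =====
def Claim_equal_strHex : Prop := ∀ (your_string : String) (output_opt : String), Dom_strHex your_string output_opt → Pre_strHex your_string output_opt → Spec_strHex your_string output_opt (strHex your_string output_opt)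

-- ===== LEMMAS AND PROOFS =====

theorem hexOf_length (bs : List Nat) : (hexOf bs).length = 2 * bs.length := by
  induction bs with
  | nil => rfl
  | cons a t ih => simp [hexOf, List.flatMap_cons] at *; omega

theorem pyGetD_append_left (h t : List Char) (i : Int) (d : Char) (h0 : 0 ≤ i) (h1 : i < h.length) :
    PySem.List.pyGetD (h ++ t) i d = PySem.List.pyGetD h i d := by
  rw [PySem.List.pyGetD_eq_getElem _ _ h0 (by simp; omega), PySem.List.pyGetD_eq_getElem _ _ h0 (by omega)]
  exact List.getElem_append_left (by omega)

theorem flatten_flatMap {α β : Type} (l : List α) (g : α → List (List β)) :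
    (l.flatMap g).flatten = l.flatMap fun i => (g i).flatten := by
  induction l with
  | nil => rfl
  | cons a t ih => simp [List.flatMap_cons, List.flatten_append, ih]

theorem join_nil_flatten (l : List (List Char)) : PySem.Chars.join [] l = l.flatten := by
  induction l with
  | nil => rfl
  | cons a t ih => cases t <;> simp_all [PySem.Chars.join, List.intercalate, List.intersperse]

-- the index-parity scan over hexOf bs, read as a flatMap of per-index pieces, is B's per-byte tokens
theorem strHex_core (bs : List Nat) :
    (PySem.List.pyRange 0 ((hexOf bs).length : Int) 1).flatMap
      (fun i => (if PySem.Int.mod i 2 = 0 then ['\\', 'x'] else []) ++ [PySem.List.pyGetD (hexOf bs) i ' '])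
    = bs.flatMap (fun b => ['\\', 'x', hexDigit (b / 16), hexDigit (b % 16)]) := by
  induction bs using List.reverseRecOn with
  | nil => rfl
  | append_singleton as c ih =>
    have hlen : (hexOf as).length = 2 * as.length := hexOf_length as
    have hstep : hexOf (as ++ [c]) = hexOf as ++ [hexDigit (c / 16), hexDigit (c % 16)] := by
      simp [hexOf]
    rw [hstep]
    have hL : ((hexOf as ++ [hexDigit (c / 16), hexDigit (c % 16)]).length : Int)
        = ((hexOf as).length : Int) + 1 + 1 := by simp; omega
    rw [hL, PySem.List.pyRange_one_succ_right (by positivity),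
        PySem.List.pyRange_one_succ_right (by positivity)]
    rw [List.flatMap_append, List.flatMap_append, List.flatMap_singleton, List.flatMap_singleton]
    have hcongr : (PySem.List.pyRange 0 ((hexOf as).length : Int) 1).flatMap
        (fun i => (if PySem.Int.mod i 2 = 0 then ['\\', 'x'] else []) ++ [PySem.List.pyGetD (hexOf as ++ [hexDigit (c / 16), hexDigit (c % 16)]) i ' '])
        = (PySem.List.pyRange 0 ((hexOf as).length : Int) 1).flatMap
        (fun i => (if PySem.Int.mod i 2 = 0 then ['\\', 'x'] else []) ++ [PySem.List.pyGetD (hexOf as) i ' ']) := by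
      apply List.flatMap_congr
      intro i hi
      rw [PySem.List.mem_pyRange_one] at hi
      rw [pyGetD_append_left _ _ _ _ hi.1 (by exact_mod_cast hi.2)]
    have hm0 : PySem.Int.mod ((hexOf as).length : Int) 2 = 0 := by
      rw [PySem.Int.mod_eq_emod_of_pos (by norm_num), hlen]; omega
    have hm1 : PySem.Int.mod (((hexOf as).length : Int) + 1) 2 = 1 := by
      rw [PySem.Int.mod_eq_emod_of_pos (by norm_num), hlen]; push_cast; omega
    have hg0 : PySem.List.pyGetD (hexOf as ++ [hexDigit (c / 16), hexDigit (c % 16)]) ((hexOf as).length : Int) ' ' = hexDigit (c / 16) := by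
      rw [PySem.List.pyGetD_eq_getElem _ _ (by positivity) (by simp)]
      simp
    have hg1 : PySem.List.pyGetD (hexOf as ++ [hexDigit (c / 16), hexDigit (c % 16)]) (((hexOf as).length : Int) + 1) ' ' = hexDigit (c % 16) := by
      rw [PySem.List.pyGetD_eq_getElem _ _ (by positivity) (by simp)]
      simp
    rw [hcongr, ih, hm0, hm1, hg0, hg1]
    simp

-- A's parity-scan loop over the hex characters of bs, joined, equals B's per-byte tokens
theorem strHex_loop_eq (bs : List Nat) :
    PySem.Chars.join []
      ((PySem.List.pyRange 0 ((hexOf bs).length : Int) 1).foldl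
        (fun temp i =>
          let temp := if PySem.Int.mod i 2 = 0 then temp ++ [['\\', 'x']] else temp
          temp ++ [[PySem.List.pyGetD (hexOf bs) i ' ']])
        [])
    = bs.flatMap (fun b => ['\\', 'x', hexDigit (b / 16), hexDigit (b % 16)]) := by
  have hfun : (fun (temp : List (List Char)) (i : Int) =>
        let temp := if PySem.Int.mod i 2 = 0 then temp ++ [['\\', 'x']] else temp
        temp ++ [[PySem.List.pyGetD (hexOf bs) i ' ']])
      = fun temp i => temp ++ ((if PySem.Int.mod i 2 = 0 then [['\\', 'x']] else []) ++ [[PySem.List.pyGetD (hexOf bs) i ' ']]) := by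
    funext temp i
    split_ifs <;> simp
  rw [hfun, PySem.List.foldl_append_eq_flatMap, List.nil_append, join_nil_flatten]
  rw [← strHex_core bs]
  rw [flatten_flatMap]
  apply List.flatMap_congr
  intro i _
  split_ifs <;> simp

-- ===== VERDICT (by name: the statement is the Claim_ definition above) =====
theorem strHex_spec : Claim_equal_strHex := by
  intro s o _ hpre
  unfold Spec_strHex
  rcases hpre with h | h <;> subst h
  · have h1 : strHex s "normal" = String.ofList (hexOf (s.toList.map Char.toNat)) := rfl
    have h2 : strHex_alt s "normal" = String.ofList (hexOf (s.toList.map Char.toNat)) := rfl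
    rw [h1, h2]
  · unfold strHex strHex_alt
    exact congrArg String.ofList (strHex_loop_eq (s.toList.map Char.toNat))
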